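-- pv_equiv track=rewrite | github.com/daniel-reich/turbo-robot | HaMCeHeJkaWvMg7LS_7.py | sun_loungers
-- ===== SOURCE A (Python) =====
-- def sun_loungers(beach):
--     count = vacant = 0
--     empty = False
--     if "1" not in beach:
--         k = len(beach)
--         if k > 1:
--             k = (k + 1) // 2
--         return k
--     left_1 = beach.index("1")
--     count += left_1 // 2
--     right_1 = len(beach) - 1
--     while beach[right_1] != "1":
--         right_1 -= 1
--     count += (len(beach) - 1 - right_1) // 2
--     for x in beach[left_1: right_1 + 1]:
--         if x == "1":
--             k, rem = divmod(vacant, 2)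
--             if k and not rem:
--                 k -= 1
--             count += k
--             empty = False
--             vacant = 0
--         else:
--             if empty:
--                 vacant += 1
--             else:
--                 empty = True
--                 vacant = 1
--     return count
-- ===== SOURCE B (Python) =====
-- def sun_loungers(beach):
--     runs = beach.split("1")
--     if len(runs) == 1:  # no "1" in beach
--         n = len(runs[0])
--         return n if n <= 1 else (n + 1) // 2
--     first, *mid, last = runs
--     total = len(first) // 2 + len(last) // 2
--     for r in mid:
--         total += max(len(r) - 1, 0) // 2
--     return total
-- ===== Notes on version B (the rewrite author's own statement) =====
-- stated objective: simpler
-- what changed: Replaces A's index/while-loop boundary scans and its three-variable (count, vacant, empty) state machine over the middle slice by one str.split at the occupied spots, then a direct per-run formula: half the length for the two edge runs, (length-1)//2 clamped at 0 for interior runs, with the no-occupied-spot ceiling case read off the single run.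
import Mathlib
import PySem

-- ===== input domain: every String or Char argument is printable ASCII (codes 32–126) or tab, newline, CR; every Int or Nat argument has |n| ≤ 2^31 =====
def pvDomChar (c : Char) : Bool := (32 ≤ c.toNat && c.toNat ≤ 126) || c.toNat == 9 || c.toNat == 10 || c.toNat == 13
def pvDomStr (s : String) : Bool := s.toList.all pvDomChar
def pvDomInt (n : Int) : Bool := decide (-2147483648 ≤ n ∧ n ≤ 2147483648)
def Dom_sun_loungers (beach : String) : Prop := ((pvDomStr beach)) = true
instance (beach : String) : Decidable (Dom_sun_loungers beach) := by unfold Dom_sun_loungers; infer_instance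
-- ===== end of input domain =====

-- B replaces A's index/while scans and (count, vacant, empty) state machine by one
-- split on '1' and a per-run formula (same O(n) cost; objective: simpler).

-- ===== PORT A =====
-- 'while beach[right_1] != "1": right_1 -= 1' as Nat recursion; the 0 fallback is the
-- loop's own stop at index 0 (this branch of A only runs when '1' occurs in beach, so
-- the scan always stops at a '1' before going negative).
def sunFindRight (cs : List Char) : Nat → Nat
  | 0 => 0
  | (i+1) => if cs[i+1]? = some '1' then i + 1 else sunFindRight cs i

-- the body of A's 'for x in beach[left_1: right_1 + 1]' on state (count, vacant, empty)
def sunStep (s : Int × Int × Bool) (x : Char) : Int × Int × Bool :=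
  let (count, vacant, empty) := s
  if x = '1' then
    let k := PySem.Int.floordiv vacant 2
    let rem := PySem.Int.mod vacant 2
    let k := if k ≠ 0 ∧ rem = 0 then k - 1 else k
    (count + k, 0, false)
  else
    if empty then (count, vacant + 1, empty) else (count, (1 : Int), true)

def sun_loungers (beach : String) : Int :=
  let cs := beach.toList
  if ¬ (PySem.Str.isIn "1" beach = true) then
    let k : Int := cs.length
    if 1 < k then PySem.Int.floordiv (k + 1) 2 else k
  else
    -- beach.index("1"): '1' is present here, so index = find
    let left1 : Int := PySem.Chars.find cs ['1']
    let count1 : Int := PySem.Int.floordiv left1 2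
    let right1 : Nat := sunFindRight cs (cs.length - 1)
    let count2 : Int := count1 + PySem.Int.floordiv ((cs.length : Int) - 1 - (right1 : Int)) 2
    let seg := PySem.List.slice cs (some left1) (some ((right1 : Int) + 1))
    (seg.foldl sunStep (count2, 0, false)).1

-- ===== PORT B =====
-- contribution of one interior run: max(len(r) - 1, 0) // 2
def sunRunContrib (r : List Char) : Int :=
  PySem.Int.floordiv (max ((r.length : Int) - 1) 0) 2

def sun_loungers_alt (beach : String) : Int :=
  let runs := PySem.Chars.splitOn beach.toList ['1']   -- beach.split("1"), sep ≠ ""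
  if runs.length = 1 then
    let n : Int := (runs.headD []).length
    if n ≤ 1 then n else PySem.Int.floordiv (n + 1) 2
  else
    -- 'first, *mid, last = runs' (runs is nonempty; this branch has length ≥ 2)
    let first := runs.headD []
    let mid := (runs.drop 1).dropLast
    let last := runs.getLastD []
    let total : Int :=
      PySem.Int.floordiv (first.length : Int) 2 + PySem.Int.floordiv (last.length : Int) 2
    mid.foldl (fun t r => t + sunRunContrib r) total

-- ===== PRECONDITION & SPEC =====
def Spec_sun_loungers (beach : String) (out : Int) : Prop := out = sun_loungers_alt beach
instance (beach : String) (out : Int) : Decidable (Spec_sun_loungers beach out) := by unfold Spec_sun_loungers; infer_instance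

-- ===== CLAIM (what is proved, stated in full; the proofs are below) =====
def Claim_equal_sun_loungers : Prop := ∀ (beach : String), Dom_sun_loungers beach → Spec_sun_loungers beach (sun_loungers beach)

-- ===== LEMMAS AND PROOFS =====

-- abbreviation for the concatenation of interior runs, each followed by the '1' that ends it
def sunFlat (rs : List (List Char)) : List Char := (rs.map (· ++ ['1'])).flatten

-- interior-run contribution as a function of the run length
def sunG (n : Nat) : Int := PySem.Int.floordiv (max ((n : Int) - 1) 0) 2

-- ---- splitOn.go characterisation ----
theorem go_no_one (l : List Char) : ∀ (fuel : Nat) (cur : List Char) (acc : List (List Char)),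
    '1' ∉ l → l.length < fuel →
    PySem.Chars.splitOn.go ['1'] fuel l cur acc = acc.reverse ++ [cur.reverse ++ l] := by
  induction l with
  | nil =>
      intro fuel cur acc _ hf
      match fuel, hf with
      | (f+1), _ => simp [PySem.Chars.splitOn.go]
  | cons c rest ih =>
      intro fuel cur acc hmem hf
      match fuel, hf with
      | (f+1), hf =>
        have hc : ¬ (c = '1') := fun h => hmem (h ▸ List.mem_cons_self)
        have : List.isPrefixOf ['1'] (c :: rest) = false := by
          simp [List.isPrefixOf]; exact fun h => hc h.symm
        rw [PySem.Chars.splitOn.go]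
        simp only [this, if_neg Bool.false_ne_true]
        rw [ih f (c :: cur) acc (fun h => hmem (List.mem_cons_of_mem _ h)) (by simpa using hf)]
        simp

theorem go_run (p : List Char) : ∀ (t cur : List Char) (fuel : Nat) (acc : List (List Char)),
    '1' ∉ p →
    PySem.Chars.splitOn.go ['1'] (fuel + p.length + 1) (p ++ '1' :: t) cur acc =
      PySem.Chars.splitOn.go ['1'] fuel t [] ((cur.reverse ++ p) :: acc) := by
  induction p with
  | nil =>
      intro t cur fuel acc _
      simp only [List.length_nil, Nat.add_zero, List.nil_append]
      rw [PySem.Chars.splitOn.go]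
      simp [List.isPrefixOf]
  | cons c p' ih =>
      intro t cur fuel acc hmem
      have hc : ¬ (c = '1') := fun h => hmem (h ▸ List.mem_cons_self)
      have hpre : List.isPrefixOf ['1'] (c :: (p' ++ '1' :: t)) = false := by
        simp [List.isPrefixOf]; exact fun h => hc h.symm
      have harith : fuel + (c :: p').length + 1 = (fuel + p'.length + 1) + 1 := by
        simp [List.length_cons]; omega
      rw [harith, List.cons_append, PySem.Chars.splitOn.go]
      simp only [hpre, if_neg Bool.false_ne_true]
      rw [ih t (c :: cur) fuel acc (fun h => hmem (List.mem_cons_of_mem _ h))]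
      simp

theorem go_flat (rs : List (List Char)) : ∀ (q : List Char) (fuel : Nat) (acc : List (List Char)),
    (∀ r ∈ rs, '1' ∉ r) → '1' ∉ q → (sunFlat rs ++ q).length < fuel →
    PySem.Chars.splitOn.go ['1'] fuel (sunFlat rs ++ q) [] acc = acc.reverse ++ (rs ++ [q]) := by
  induction rs with
  | nil =>
      intro q fuel acc _ hq hf
      simp only [sunFlat, List.map_nil, List.flatten_nil, List.nil_append] at *
      rw [go_no_one _ _ _ _ hq hf]
      simp
  | cons r rs' ih =>
      intro q fuel acc hrs hq hf
      have hlen : (sunFlat (r :: rs') ++ q).length = r.length + 1 + (sunFlat rs' ++ q).length := by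
        simp [sunFlat]; omega
      have hfuel : fuel = (fuel - r.length - 1) + r.length + 1 := by omega
      have hshape : sunFlat (r :: rs') ++ q = r ++ '1' :: (sunFlat rs' ++ q) := by
        simp [sunFlat]
      have hf' : r.length + 1 + (sunFlat rs' ++ q).length < fuel := by
        rw [hlen] at hf; omega
      rw [hshape, hfuel, go_run r _ _ _ _ (hrs r List.mem_cons_self),
          ih q _ _ (fun x hx => hrs x (List.mem_cons_of_mem _ hx)) hq (by omega)]
      simp

theorem splitOn_no_one (cs : List Char) (h : '1' ∉ cs) :
    PySem.Chars.splitOn cs ['1'] = [cs] := by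
  unfold PySem.Chars.splitOn
  rw [go_no_one _ _ _ _ h (by omega)]; simp

theorem splitOn_decomp (p : List Char) (rs : List (List Char)) (q : List Char)
    (hp : '1' ∉ p) (hrs : ∀ r ∈ rs, '1' ∉ r) (hq : '1' ∉ q) :
    PySem.Chars.splitOn (p ++ '1' :: (sunFlat rs ++ q)) ['1'] = p :: (rs ++ [q]) := by
  unfold PySem.Chars.splitOn
  have hlen : (p ++ '1' :: (sunFlat rs ++ q)).length + 1
      = ((sunFlat rs ++ q).length + 1) + p.length + 1 := by simp; omega
  rw [hlen, go_run p _ _ _ _ hp, go_flat rs q _ _ hrs hq (by omega)]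
  simp

-- ---- decomposition of a string containing '1' ----
theorem first_split (cs : List Char) (h : '1' ∈ cs) :
    ∃ p suf, '1' ∉ p ∧ cs = p ++ '1' :: suf := by
  induction cs with
  | nil => cases h
  | cons c rest ih =>
      by_cases hc : c = '1'
      · exact ⟨[], rest, by simp, by simp [hc]⟩
      · obtain ⟨p, suf, hp, heq⟩ := ih (by
          cases List.mem_cons.1 h with
          | inl h' => exact absurd h'.symm hc
          | inr h' => exact h')
        exact ⟨c :: p, suf, by simp [hp]; exact fun h' => hc h'.symm, by simp [heq]⟩

theorem sun_decomp_aux (n : Nat) : ∀ (cs : List Char), cs.length ≤ n → '1' ∈ cs →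
    ∃ p rs q, '1' ∉ p ∧ (∀ r ∈ rs, '1' ∉ r) ∧ '1' ∉ q ∧
      cs = p ++ '1' :: (sunFlat rs ++ q) := by
  induction n with
  | zero => intro cs hlen h; interval_cases h' : cs.length <;> simp_all
  | succ n ih =>
      intro cs hlen h
      obtain ⟨p, suf, hp, heq⟩ := first_split cs h
      by_cases hs : '1' ∈ suf
      · have hsuf : suf.length ≤ n := by
          have := congrArg List.length heq; simp at this; omega
        obtain ⟨p', rs', q, hp', hrs', hq, hsq⟩ := ih suf hsuf hs
        refine ⟨p, p' :: rs', q, hp, ?_, hq, ?_⟩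
        · intro r hr
          cases List.mem_cons.1 hr with
          | inl h' => exact h' ▸ hp'
          | inr h' => exact hrs' r h'
        · rw [heq, hsq]; simp [sunFlat]
      · exact ⟨p, [], suf, hp, by simp, hs, by simpa [sunFlat] using heq⟩

theorem sun_decomp (cs : List Char) (h : '1' ∈ cs) :
    ∃ p rs q, '1' ∉ p ∧ (∀ r ∈ rs, '1' ∉ r) ∧ '1' ∉ q ∧
      cs = p ++ '1' :: (sunFlat rs ++ q) :=
  sun_decomp_aux cs.length cs le_rfl h

-- '1' :: sunFlat rs ends with a '1'
theorem sun_ext (rs : List (List Char)) : ∃ w, '1' :: sunFlat rs = w ++ ['1'] := by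
  induction rs with
  | nil => exact ⟨[], rfl⟩
  | cons r rs' ih =>
      obtain ⟨w', hw'⟩ := ih
      refine ⟨'1' :: r ++ w', ?_⟩
      have : sunFlat (r :: rs') = r ++ ['1'] ++ sunFlat rs' := by simp [sunFlat]
      rw [this]
      have : '1' :: (r ++ ['1'] ++ sunFlat rs') = ('1' :: r) ++ ('1' :: sunFlat rs') := by simp
      rw [this, hw']; simp

-- ---- the right-to-left while loop ----
theorem findRight_eq (u q : List Char) (hq : '1' ∉ q) :
    ∀ j, j ≤ q.length → sunFindRight (u ++ '1' :: q) (u.length + j) = u.length := by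
  intro j
  induction j with
  | zero =>
      intro _
      have hget : (u ++ '1' :: q)[u.length]? = some '1' := by
        rw [List.getElem?_append_right le_rfl]; simp
      cases hu : u.length with
      | zero => simp [sunFindRight]
      | succ i => rw [Nat.add_zero, sunFindRight]; rw [hu] at hget; simp [hget]
  | succ j ih =>
      intro hj
      have hidx : u.length + (j + 1) = (u.length + j) + 1 := by omega
      have hj' : j < q.length := by omega
      obtain ⟨a, ha⟩ : ∃ a, q[j]? = some a := ⟨_, List.getElem?_eq_getElem hj'⟩
      have hane : ¬ (a = '1') := fun h => hq (h ▸ List.mem_of_getElem? ha)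
      have hget : (u ++ '1' :: q)[(u.length + j) + 1]? = some a := by
        rw [List.getElem?_append_right (by omega)]
        have h2 : u.length + j + 1 - u.length = j + 1 := by omega
        rw [h2]; simpa using ha
      rw [hidx, sunFindRight, hget]
      simp only [Option.some.injEq, if_neg hane]
      exact ih (by omega)

-- ---- find points at the first '1' ----
theorem prefix_one_iff (l : List Char) (j : Nat) : (['1'] <+: l.drop j) ↔ l[j]? = some '1' := by
  rw [← List.head?_drop]
  constructor
  · rintro ⟨t, ht⟩; rw [← ht]; rfl
  · intro h
    cases hd : l.drop j with
    | nil => rw [hd] at h; simp at h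
    | cons a t => rw [hd] at h; simp at h; exact ⟨t, by simp [h]⟩

theorem find_first (p rest : List Char) (hp : '1' ∉ p) :
    PySem.Chars.find (p ++ '1' :: rest) ['1'] = (p.length : Int) := by
  have hinf : ['1'] <:+: p ++ '1' :: rest := ⟨p, rest, by simp⟩
  have h0 : 0 ≤ PySem.Chars.find (p ++ '1' :: rest) ['1'] :=
    (PySem.Chars.find_nonneg_iff _ _).2 hinf
  obtain ⟨hpre, hmin⟩ := PySem.Chars.find_spec h0
  have hat : (p ++ '1' :: rest)[p.length]? = some '1' := by
    rw [List.getElem?_append_right le_rfl]; simp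
  have h1 : (PySem.Chars.find (p ++ '1' :: rest) ['1']).toNat ≤ p.length := by
    by_contra hgt
    exact hmin p.length (by omega) ((prefix_one_iff _ p.length).2 hat)
  have h2 : p.length ≤ (PySem.Chars.find (p ++ '1' :: rest) ['1']).toNat := by
    by_contra hgt
    have hpr := (prefix_one_iff _ _).1 hpre
    rw [List.getElem?_append_left (by omega)] at hpr
    exact hp (List.mem_of_getElem? hpr)
  omega

-- ---- the (count, vacant, empty) state machine over the middle slice ----
theorem fold_run_true (r : List Char) (hr : '1' ∉ r) :
    ∀ (c v : Int), List.foldl sunStep (c, v, true) r = (c, v + r.length, true) := by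
  induction r with
  | nil => intro c v; simp
  | cons x r' ih =>
      intro c v
      have hx : ¬ (x = '1') := fun h => hr (h ▸ List.mem_cons_self)
      have hstep : sunStep (c, v, true) x = (c, v + 1, true) := by
        simp [sunStep, hx]
      rw [List.foldl_cons, hstep, ih (fun h => hr (List.mem_cons_of_mem _ h))]
      simp; ring

theorem fold_run (r : List Char) (hr : '1' ∉ r) (c : Int) :
    List.foldl sunStep (c, 0, false) r = (c, (r.length : Int), !r.isEmpty) := by
  cases r with
  | nil => simp
  | cons x r' =>
      have hx : ¬ (x = '1') := fun h => hr (h ▸ List.mem_cons_self)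
      have hstep : sunStep (c, 0, false) x = (c, 1, true) := by simp [sunStep, hx]
      rw [List.foldl_cons, hstep, fold_run_true r' (fun h => hr (List.mem_cons_of_mem _ h))]
      simp; ring

theorem step_one (c : Int) (n : Nat) (e : Bool) :
    sunStep (c, (n : Int), e) '1' = (c + sunG n, 0, false) := by
  simp only [sunStep, sunG, PySem.Int.floordiv, PySem.Int.mod,
    Int.fdiv_eq_ediv, Int.fmod_eq_emod]
  split_ifs <;> simp_all <;> omega

theorem fold_flat (rs : List (List Char)) (hrs : ∀ r ∈ rs, '1' ∉ r) :
    ∀ c : Int, List.foldl sunStep (c, 0, false) (sunFlat rs)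
      = (c + (rs.map (fun r => sunG r.length)).sum, 0, false) := by
  induction rs with
  | nil => intro c; simp [sunFlat]
  | cons r rs' ih =>
      intro c
      have hshape : sunFlat (r :: rs') = (r ++ ['1']) ++ sunFlat rs' := by simp [sunFlat]
      rw [hshape, List.foldl_append, List.foldl_append,
        fold_run r (hrs r List.mem_cons_self) c, List.foldl_cons, List.foldl_nil,
        step_one, ih (fun x hx => hrs x (List.mem_cons_of_mem _ hx))]
      simp; ring

theorem isIn_one_iff (beach : String) : PySem.Str.isIn "1" beach = true ↔ '1' ∈ beach.toList := by
  rw [PySem.Str.isIn_iff_infix]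
  constructor
  · intro h
    have : "1".toList = ['1'] := rfl
    rw [this] at h
    exact h.subset List.mem_cons_self
  · intro h
    obtain ⟨s, t, hst⟩ := List.append_of_mem h
    exact ⟨s, t, by simp [hst]⟩

theorem step_one_zero (c : Int) : sunStep (c, 0, false) '1' = (c, 0, false) := by
  have h := step_one c 0 false
  simpa [sunG] using h

theorem sun_main (beach : String) : sun_loungers beach = sun_loungers_alt beach := by
  by_cases hmem : '1' ∈ beach.toList
  · obtain ⟨p, rs, q, hp, hrs, hq, hcs⟩ := sun_decomp _ hmem
    obtain ⟨w, hw⟩ := sun_ext rs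
    have hwlen : w.length = (sunFlat rs).length := by
      have := congrArg List.length hw; simp at this; omega
    have hcs2 : beach.toList = (p ++ w) ++ '1' :: q := by
      rw [hcs, show ('1' :: (sunFlat rs ++ q)) = ('1' :: sunFlat rs) ++ q by simp, hw]
      simp
    have hisin : PySem.Str.isIn "1" beach = true := (isIn_one_iff beach).2 hmem
    have hfind : PySem.Chars.find beach.toList ['1'] = (p.length : Int) := by
      rw [hcs]; exact find_first p _ hp
    have hlen : beach.toList.length = p.length + w.length + 1 + q.length := by
      rw [hcs2]; simp; omega
    have hright : sunFindRight beach.toList (beach.toList.length - 1) = (p ++ w).length := by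
      rw [hcs2]
      have h1 : ((p ++ w) ++ '1' :: q).length - 1 = (p ++ w).length + q.length := by
        simp; omega
      rw [h1]
      exact findRight_eq _ _ hq q.length le_rfl
    have hslice : PySem.List.slice beach.toList (some (p.length : Int))
        (some (((p ++ w).length : Int) + 1)) = '1' :: sunFlat rs := by
      have hb : (((p ++ w).length : Int) + 1) = (((p ++ w).length + 1 : Nat) : Int) := by
        push_cast; ring
      rw [hb, PySem.List.slice_natCast, hcs, List.drop_left]
      have h2 : (p ++ w).length + 1 - p.length = ('1' :: sunFlat rs).length := by
        simp [hwlen]; omega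
      rw [show '1' :: (sunFlat rs ++ q) = ('1' :: sunFlat rs) ++ q by simp,
        h2, List.take_left' rfl]
    have hsplit : PySem.Chars.splitOn beach.toList ['1'] = p :: (rs ++ [q]) := by
      rw [hcs]; exact splitOn_decomp p rs q hp hrs hq
    have hqlen : (beach.toList.length : Int) - 1 - ((p ++ w).length : Int) = (q.length : Int) := by
      rw [hlen]; push_cast; simp; ring
    simp only [sun_loungers, sun_loungers_alt, hisin, hsplit, hfind, hright, hslice, hqlen]
    simp only [not_true_eq_false, if_false]
    rw [List.foldl_cons, step_one_zero, fold_flat rs hrs]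
    have hlen1 : ¬ ((p :: (rs ++ [q])).length = 1) := by simp
    rw [if_neg hlen1]
    simp only [List.headD_cons, List.drop_succ_cons, List.drop_zero, List.dropLast_concat]
    have hlast : (p :: (rs ++ [q])).getLastD [] = q := by
      rw [show p :: (rs ++ [q]) = (p :: rs) ++ [q] by simp, List.getLastD_concat]
    rw [hlast, PySem.List.foldl_add]
    have hmap : rs.map sunRunContrib = rs.map (fun r => sunG r.length) := rfl
    rw [hmap]
  · have hisin : PySem.Str.isIn "1" beach = false := by
      rw [← Bool.not_eq_true, isIn_one_iff]; exact hmem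
    have hsplit : PySem.Chars.splitOn beach.toList ['1'] = [beach.toList] :=
      splitOn_no_one _ hmem
    simp only [sun_loungers, sun_loungers_alt, hisin, hsplit]
    norm_num
    split_ifs <;> omega


-- ===== VERDICT (by name: the statement is the Claim_ definition above) =====
theorem sun_loungers_spec : Claim_equal_sun_loungers := by
  intro beach _
  exact sun_main beach
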